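-- pv_equiv track=rewrite | github.com/raeez/chiral-bar-cobar | compute/lib/mc3_ext_computation.py | multi_partition_function
-- ===== SOURCE A (Python) =====
-- def multi_partition_function(N: int, k: int) -> int:
--     """Number of N-colored partitions of k.
--
--     An N-colored partition of k is a tuple (λ₁, ..., λ_N) of partitions
--     such that |λ₁| + ... + |λ_N| = k.
--
--     For N = 1, this is just p(k).
--     For general N, p_N(k) = Σ_{k₁+...+k_N = k} p(k₁)...p(k_N).
--
--     Equivalently, the generating function is:
--       Σ_k p_N(k) x^k = (∏_{n≥1} 1/(1-x^n))^N
--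
--     We compute via convolution.
--
--     Args:
--         N: number of colors (rank of the Lie algebra).
--         k: integer to partition.
--
--     Returns:
--         p_N(k).
--     """
--     if N < 1:
--         raise ValueError(f"N must be positive, got {N}")
--     if k < 0:
--         return 0
--     if k == 0:
--         return 1
--
--     # Start with p(k) for the first color
--     # Use DP: build the generating function coefficients up to degree k
--     # for ∏_{n≥1} 1/(1-x^n), then convolve N times.
--
--     # Single partition function table
--     p_table = [0] * (k + 1)
--     p_table[0] = 1
--     for part in range(1, k + 1):
--         for j in range(part, k + 1):
--             p_table[j] += p_table[j - part]
--
--     # Now convolve N copies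
--     result = p_table[:]
--     for _ in range(N - 1):
--         new_result = [0] * (k + 1)
--         for i in range(k + 1):
--             for j in range(k + 1 - i):
--                 new_result[i + j] += result[i] * p_table[j]
--         result = new_result
--
--     return result[k]
-- ===== SOURCE B (Python) =====
-- def multi_partition_function(N: int, k: int) -> int:
--     """Number of N-colored partitions of k (same contract as A), computed by
--     raising the truncated partition series to the N-th power with binary
--     exponentiation instead of N-1 sequential convolutions."""
--     if N < 1:
--         raise ValueError(f"N must be positive, got {N}")
--     if k < 0:
--         return 0
--     if k == 0:
--         return 1
--
--     # Truncated series of prod_{n>=1} 1/(1-x^n) up to degree k (standard coin DP).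
--     p = [1] + [0] * k
--     for part in range(1, k + 1):
--         for j in range(part, k + 1):
--             p[j] += p[j - part]
--
--     def mul(a, b):
--         return [sum(a[i] * b[m - i] for i in range(m + 1)) for m in range(k + 1)]
--
--     # result = p^N mod x^(k+1), square-and-multiply: O(k^2 log N) instead of O(N k^2)
--     result = [1] + [0] * k
--     base = p
--     e = N
--     while e > 0:
--         if e & 1:
--             result = mul(result, base)
--         e >>= 1
--         if e:
--             base = mul(base, base)
--     return result[k]
-- ===== Notes on version B (the rewrite author's own statement) =====
-- stated objective: faster
-- what changed: B raises the truncated partition series to the N-th power by square-and-multiply (binary exponentiation) with a gather-style convolution, instead of A's N-1 sequential scatter-style convolutions.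
import Mathlib
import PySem

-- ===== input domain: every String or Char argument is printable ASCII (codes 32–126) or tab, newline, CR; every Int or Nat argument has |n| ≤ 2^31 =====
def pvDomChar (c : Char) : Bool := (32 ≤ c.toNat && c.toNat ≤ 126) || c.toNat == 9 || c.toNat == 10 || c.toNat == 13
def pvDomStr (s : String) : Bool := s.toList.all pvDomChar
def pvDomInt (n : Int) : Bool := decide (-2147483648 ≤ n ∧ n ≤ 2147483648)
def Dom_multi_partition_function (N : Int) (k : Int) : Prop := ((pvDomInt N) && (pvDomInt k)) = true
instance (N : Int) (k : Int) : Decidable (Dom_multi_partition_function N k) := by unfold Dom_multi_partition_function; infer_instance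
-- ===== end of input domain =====

-- B replaces A's N-1 sequential truncated convolutions by square-and-multiply
-- (binary exponentiation) on the truncated partition series: O(k^2 log N) products
-- instead of O(N k^2); both raise ValueError for N < 1 (excluded by Pre_).

-- ===== PORT A =====

-- p_table: [0]*(k+1), p_table[0]=1, then the two nested `for` loops (k ≥ 1 here, n = k.toNat)
def pvTblA (n : Nat) : List Int :=
  (List.range' 1 n).foldl
    (fun t part =>
      (List.range' part (n + 1 - part)).foldl
        (fun t2 j => t2.set j (t2.getD j 0 + t2.getD (j - part) 0)) t)
    (1 :: List.replicate n 0)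

-- A's convolution pass: new_result = [0]*(k+1); for i …: for j …: new_result[i+j] += result[i]*p_table[j]
def pvMulA (n : Nat) (r p : List Int) : List Int :=
  (List.range (n + 1)).foldl
    (fun acc i =>
      (List.range (n + 1 - i)).foldl
        (fun acc2 j => acc2.set (i + j) (acc2.getD (i + j) 0 + r.getD i 0 * p.getD j 0)) acc)
    (List.replicate (n + 1) 0)

-- `for _ in range(N-1): result = convolve(result, p_table)`
def pvRepA (n : Nat) (p : List Int) : Nat → List Int → List Int
  | 0, r => r
  | t + 1, r => pvRepA n p t (pvMulA n r p)

def multi_partition_function (N : Int) (k : Int) : Int :=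
  if N < 1 then 0   -- Python raises ValueError here; excluded by Pre_
  else if k < 0 then 0
  else if k = 0 then 1
  else
    let n := k.toNat
    let p := pvTblA n
    (pvRepA n p (N - 1).toNat p).getD n 0

-- ===== PORT B =====

-- same standard coin DP for the truncated partition series (B's first phase)
def pvTblB (n : Nat) : List Int :=
  (List.range' 1 n).foldl
    (fun t part =>
      (List.range' part (n + 1 - part)).foldl
        (fun t2 j => t2.set j (t2.getD j 0 + t2.getD (j - part) 0)) t)
    (1 :: List.replicate n 0)

-- mul(a, b): [sum(a[i]*b[m-i] for i in range(m+1)) for m in range(k+1)]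
def pvMulB (n : Nat) (a b : List Int) : List Int :=
  (List.range (n + 1)).map
    (fun m => ((List.range (m + 1)).map (fun i => a.getD i 0 * b.getD (m - i) 0)).sum)

-- while e > 0: if e & 1: result = mul(result, base); e >>= 1; if e: base = mul(base, base)
def pvPowB (n : Nat) (r b : List Int) (e : Nat) : List Int :=
  if e = 0 then r
  else
    let r' := if e % 2 = 1 then pvMulB n r b else r
    let e' := e / 2
    let b' := if e' = 0 then b else pvMulB n b b
    pvPowB n r' b' e'
termination_by e
decreasing_by exact Nat.div_lt_self (Nat.pos_of_ne_zero (by assumption)) (by decide)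

def multi_partition_function_alt (N : Int) (k : Int) : Int :=
  if N < 1 then 0   -- Python raises ValueError here; excluded by Pre_
  else if k < 0 then 0
  else if k = 0 then 1
  else
    let n := k.toNat
    let p := pvTblB n
    (pvPowB n (1 :: List.replicate n 0) p N.toNat).getD n 0

-- ===== PRECONDITION & SPEC =====
-- A raises ValueError exactly when N < 1; everywhere else it returns normally.
def Pre_multi_partition_function (N : Int) (k : Int) : Prop := 1 ≤ N
instance (N : Int) (k : Int) : Decidable (Pre_multi_partition_function N k) := by
  unfold Pre_multi_partition_function; infer_instance

def pvWitness_multi_partition_function : Int × Int := (2, 5)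

def Spec_multi_partition_function (N : Int) (k : Int) (out : Int) : Prop := out = multi_partition_function_alt N k
instance (N : Int) (k : Int) (out : Int) : Decidable (Spec_multi_partition_function N k out) := by unfold Spec_multi_partition_function; infer_instance

-- ===== CLAIM (what is proved, stated in full; the proofs are below) =====
def Claim_equal_multi_partition_function : Prop := ∀ (N : Int) (k : Int), Dom_multi_partition_function N k → Pre_multi_partition_function N k → Spec_multi_partition_function N k (multi_partition_function N k)

-- ===== LEMMAS AND PROOFS =====

-- the (truncated) power series whose first n+1 coefficients a list holds
def pvSeries (l : List Int) : PowerSeries ℤ := PowerSeries.mk (fun i => l.getD i 0)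

-- l agrees with φ on all coefficients up to n
def pvAgree (n : ℕ) (l : List Int) (φ : PowerSeries ℤ) : Prop :=
  ∀ m, m ≤ n → l.getD m 0 = PowerSeries.coeff m φ

lemma pv_getD_set (l : List Int) (i j : ℕ) (v : Int) :
    (l.set i v).getD j 0 = if i = j ∧ i < l.length then v else l.getD j 0 := by
  simp [List.getD, List.getElem?_set]
  split_ifs <;> simp_all <;> try omega

lemma pv_getD_replicate (n s : ℕ) : (List.replicate n (0 : Int)).getD s 0 = 0 := by
  simp [List.getD, List.getElem?_replicate]
  split_ifs <;> simp

-- scatter loop: the value at m after all `acc[idx x] += f x` updates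
lemma pv_scatter {α : Type} (idx : α → ℕ) (f : α → Int) :
    ∀ (xs : List α) (l : List Int) (m : ℕ), m < l.length → (∀ x ∈ xs, idx x < l.length) →
      (xs.foldl (fun acc x => acc.set (idx x) (acc.getD (idx x) 0 + f x)) l).getD m 0
        = l.getD m 0 + (xs.map (fun x => if idx x = m then f x else 0)).sum := by
  intro xs
  induction xs with
  | nil => simp
  | cons x xs ih =>
    intro l m hm hidx
    have hx : idx x < l.length := hidx x (by simp)
    have hlen : (l.set (idx x) (l.getD (idx x) 0 + f x)).length = l.length := by simp
    rw [List.foldl_cons, ih _ m (by omega) (by intro y hy; rw [hlen]; exact hidx y (by simp [hy]))]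
    rw [pv_getD_set]
    by_cases h : idx x = m <;> simp [h, hx, hm] <;> try ring

lemma pv_lsum (t : ℕ) (f : ℕ → ℤ) : ((List.range t).map f).sum = ∑ i ∈ Finset.range t, f i := rfl

def pvConvSum (a b : List Int) (m : ℕ) : ℤ :=
  ∑ i ∈ Finset.range (m + 1), a.getD i 0 * b.getD (m - i) 0

lemma pv_sum_flatMap {α : Type} (l : List α) (g : α → List ℤ) :
    (l.flatMap g).sum = (l.map (fun a => (g a).sum)).sum := by
  rw [List.flatMap_def, List.sum_flatten, List.map_map]; rfl

lemma pvMulA_getD (n : ℕ) (r p : List Int) (m : ℕ) (hm : m ≤ n) :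
    (pvMulA n r p).getD m 0 = pvConvSum r p m := by
  have h1 : pvMulA n r p
      = ((List.range (n + 1)).flatMap (fun i => (List.range (n + 1 - i)).map (fun j => (i, j)))).foldl
          (fun acc x => acc.set (x.1 + x.2) (acc.getD (x.1 + x.2) 0 + r.getD x.1 0 * p.getD x.2 0))
          (List.replicate (n + 1) 0) := by
    rw [List.foldl_flatMap]
    simp only [List.foldl_map]
    rfl
  have h2 := pv_scatter (fun x : ℕ × ℕ => x.1 + x.2) (fun x => r.getD x.1 0 * p.getD x.2 0)
    ((List.range (n + 1)).flatMap (fun i => (List.range (n + 1 - i)).map (fun j => (i, j))))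
    (List.replicate (n + 1) 0) m
    (by simp; omega)
    (by
      intro x hx
      simp only [List.mem_flatMap, List.mem_map, List.mem_range] at hx
      obtain ⟨i, hi, j, hj, rfl⟩ := hx
      simp; omega)
  rw [h1, h2, pv_getD_replicate, List.map_flatMap, pv_sum_flatMap]
  simp only [List.map_map, Function.comp_def]
  rw [pv_lsum]
  have inner : ∀ i, ((List.range (n + 1 - i)).map
        (fun j => if i + j = m then r.getD i 0 * p.getD j 0 else 0)).sum
      = if i ≤ m then r.getD i 0 * p.getD (m - i) 0 else 0 := by
    intro i
    rw [pv_lsum]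
    by_cases hi : i ≤ m
    · have hcond : ∀ j, (if i + j = m then r.getD i 0 * p.getD j 0 else 0)
          = if j = m - i then r.getD i 0 * p.getD j 0 else 0 := by
        intro j; split_ifs with h h' h' <;> first | rfl | omega
      rw [Finset.sum_congr rfl (fun j _ => hcond j),
        Finset.sum_ite_eq' (Finset.range (n + 1 - i)) (m - i)
          (fun j => r.getD i 0 * p.getD j 0),
        if_pos (Finset.mem_range.mpr (by omega)), if_pos hi]
    · rw [if_neg hi]
      exact Finset.sum_eq_zero (fun j _ => by rw [if_neg (by omega)])
  rw [Finset.sum_congr rfl (fun i _ => inner i), zero_add, pvConvSum,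
    ← Finset.sum_subset
      (show Finset.range (m + 1) ⊆ Finset.range (n + 1) by
        intro x hx; simp only [Finset.mem_range] at *; omega)
      (fun i _ hni => by rw [if_neg (by simp only [Finset.mem_range] at hni; omega)])]
  exact Finset.sum_congr rfl
    (fun i hi => if_pos (by simp only [Finset.mem_range] at hi; omega))

lemma pvMulB_getD (n : ℕ) (a b : List Int) (m : ℕ) (hm : m ≤ n) :
    (pvMulB n a b).getD m 0 = pvConvSum a b m := by
  rw [pvMulB, List.getD, List.getElem?_map, List.getElem?_range (by omega)]
  simp only [Option.map_some, Option.getD_some]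
  rw [pv_lsum]; rfl

lemma pv_coeff_mul (m : ℕ) (φ ψ : PowerSeries ℤ) :
    PowerSeries.coeff m (φ * ψ)
      = ∑ i ∈ Finset.range (m + 1), PowerSeries.coeff i φ * PowerSeries.coeff (m - i) ψ := by
  rw [PowerSeries.coeff_mul, Finset.Nat.sum_antidiagonal_eq_sum_range_succ_mk]

lemma pvAgree_conv {n : ℕ} {a b : List Int} {φ ψ : PowerSeries ℤ}
    (ha : pvAgree n a φ) (hb : pvAgree n b ψ) (m : ℕ) (hm : m ≤ n) :
    pvConvSum a b m = PowerSeries.coeff m (φ * ψ) := by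
  rw [pv_coeff_mul, pvConvSum]
  refine Finset.sum_congr rfl (fun i hi => ?_)
  have hi' : i ≤ m := by simpa [Nat.lt_succ_iff] using hi
  rw [ha i (by omega), hb (m - i) (by omega)]

lemma pvAgree_mulA {n : ℕ} {a b : List Int} {φ ψ : PowerSeries ℤ}
    (ha : pvAgree n a φ) (hb : pvAgree n b ψ) : pvAgree n (pvMulA n a b) (φ * ψ) := by
  intro m hm; rw [pvMulA_getD n a b m hm, pvAgree_conv ha hb m hm]

lemma pvAgree_mulB {n : ℕ} {a b : List Int} {φ ψ : PowerSeries ℤ}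
    (ha : pvAgree n a φ) (hb : pvAgree n b ψ) : pvAgree n (pvMulB n a b) (φ * ψ) := by
  intro m hm; rw [pvMulB_getD n a b m hm, pvAgree_conv ha hb m hm]

lemma pvAgree_one (n : ℕ) : pvAgree n (1 :: List.replicate n 0) 1 := by
  intro m hm
  cases m with
  | zero => simp [PowerSeries.coeff_one]
  | succ s => simp [PowerSeries.coeff_one]

lemma pvAgree_repA {n : ℕ} {p : List Int} {φ : PowerSeries ℤ} (hp : pvAgree n p φ) :
    ∀ (t : ℕ) (r : List Int) (ψ : PowerSeries ℤ), pvAgree n r ψ →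
      pvAgree n (pvRepA n p t r) (ψ * φ ^ t) := by
  intro t
  induction t with
  | zero => intro r ψ h; simpa using h
  | succ t ih =>
    intro r ψ h
    have := ih (pvMulA n r p) (ψ * φ) (pvAgree_mulA h hp)
    simpa [mul_assoc, pow_succ, mul_comm, mul_left_comm] using this

lemma pvAgree_powB {n : ℕ} :
    ∀ (e : ℕ) (r b : List Int) (ρ β : PowerSeries ℤ), pvAgree n r ρ → pvAgree n b β →
      pvAgree n (pvPowB n r b e) (ρ * β ^ e) := by
  intro e
  induction e using Nat.strong_induction_on with
  | _ e ih =>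
    intro r b ρ β hr hb
    rw [pvPowB]
    by_cases he : e = 0
    · simp [he, hr]
    · simp only [if_neg he]
      have hr' : pvAgree n (if e % 2 = 1 then pvMulB n r b else r)
          (if e % 2 = 1 then ρ * β else ρ) := by
        split_ifs
        · exact pvAgree_mulB hr hb
        · exact hr
      have hb' : pvAgree n (if e / 2 = 0 then b else pvMulB n b b)
          (if e / 2 = 0 then β else β * β) := by
        split_ifs
        · exact hb
        · exact pvAgree_mulB hb hb
      have hrec := ih (e / 2) (Nat.div_lt_self (Nat.pos_of_ne_zero he) (by decide))
        _ _ _ _ hr' hb'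
      have heq : (if e % 2 = 1 then ρ * β else ρ) * (if e / 2 = 0 then β else β * β) ^ (e / 2)
          = ρ * β ^ e := by
        have hsplit : β ^ e = (β * β) ^ (e / 2) * β ^ (e % 2) := by
          rw [← pow_two, ← pow_mul, ← pow_add]
          congr 1
          omega
        rcases Nat.mod_two_eq_zero_or_one e with hpar | hpar
        · have h0 : ¬ e / 2 = 0 := by omega
          rw [if_neg (by omega), if_neg h0, hsplit, hpar]
          ring
        · by_cases h0 : e / 2 = 0
          · rw [if_pos hpar, if_pos h0, h0, show e = 1 by omega]
            ring
          · rw [if_pos hpar, if_neg h0, hsplit, hpar]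
            ring
      rw [heq] at hrec
      exact hrec

-- ===== VERDICT (by name: the statement is the Claim_ definition above) =====
theorem multi_partition_function_spec : Claim_equal_multi_partition_function := by
  intro N k _hDom hPre
  unfold Spec_multi_partition_function
  unfold Pre_multi_partition_function at hPre
  unfold multi_partition_function multi_partition_function_alt
  have hN : ¬ N < 1 := by omega
  by_cases hk : k < 0
  · simp [hN, hk]
  · by_cases hk0 : k = 0
    · simp [hN, hk0]
    · simp only [hN, hk, hk0, if_false]
      set n := k.toNat with hn
      have hTbl : pvTblB n = pvTblA n := rfl
      set p := pvTblA n with hp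
      have hpAg : pvAgree n p (pvSeries p) := by
        intro m hm; rw [pvSeries, PowerSeries.coeff_mk]
      have hA := pvAgree_repA hpAg ((N - 1).toNat) p (pvSeries p) hpAg
      have hB := pvAgree_powB (n := n) N.toNat (1 :: List.replicate n 0) (pvTblB n)
        1 (pvSeries p) (pvAgree_one n) (by rw [hTbl]; exact hpAg)
      have hexp : (N - 1).toNat + 1 = N.toNat := by omega
      rw [hA n (le_refl n), hB n (le_refl n), one_mul, ← hexp, pow_succ,
        mul_comm]
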